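-- pv_equiv track=rewrite | github.com/MrBrantCode/unitest_baseline | mut_generate/mist_train_cf/cf_60388/solution.py | ways_to_checkout
-- ===== SOURCE A (Python) =====
-- def ways_to_checkout(max_score):
--     scores = list(range(1, 21)) + [25]
--     possibilities = [0] + scores + [2*s for s in scores] + [3*s for s in scores[:20]]
--
--     count = 0
--     for i in range(len(possibilities)):
--         for j in range(i, len(possibilities)):
--             for k in range(j, len(possibilities)):
--                 if possibilities[i] + possibilities[j] + possibilities[k] < max_score:
--                     count += 1
--
--     return count
-- ===== SOURCE B (Python) =====
-- def ways_to_checkout(max_score):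
--     scores = list(range(1, 21)) + [25]
--     vals = [0] + scores + [2 * s for s in scores] + [3 * s for s in scores[:20]]
--     # cnt_table[v] = how many dart values are < v (values are all in 0..60)
--     cnt_table = [sum(1 for x in vals if x < v) for v in range(62)]
--
--     def cnt_lt(v):
--         if v <= 0:
--             return 0
--         if v >= 62:
--             return len(vals)
--         return cnt_table[v]
--
--     # Count ordered triples by symmetry instead of looping over i <= j <= k:
--     # multisets = (all-ordered + 3*pairs-with-a-repeat + 2*all-three-equal) / 6.
--     t3 = 0
--     for a in vals:
--         for b in vals:
--             t3 += cnt_lt(max_score - a - b)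
--     t2 = 0
--     for a in vals:
--         t2 += cnt_lt(max_score - 2 * a)
--     t1 = 0
--     for a in vals:
--         if 3 * a < max_score:
--             t1 += 1
--     return (t3 + 3 * t2 + 2 * t1) // 6
-- ===== Notes on version B (the rewrite author's own statement) =====
-- stated objective: faster
-- what changed: Replaces the triple nested index loop over i<=j<=k by orbit counting: a precomputed count-below table gives the number of ordered triples below the threshold in one double loop, and the multiset count is recovered as (t3+3*t2+2*t1)//6.
import Mathlib
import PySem

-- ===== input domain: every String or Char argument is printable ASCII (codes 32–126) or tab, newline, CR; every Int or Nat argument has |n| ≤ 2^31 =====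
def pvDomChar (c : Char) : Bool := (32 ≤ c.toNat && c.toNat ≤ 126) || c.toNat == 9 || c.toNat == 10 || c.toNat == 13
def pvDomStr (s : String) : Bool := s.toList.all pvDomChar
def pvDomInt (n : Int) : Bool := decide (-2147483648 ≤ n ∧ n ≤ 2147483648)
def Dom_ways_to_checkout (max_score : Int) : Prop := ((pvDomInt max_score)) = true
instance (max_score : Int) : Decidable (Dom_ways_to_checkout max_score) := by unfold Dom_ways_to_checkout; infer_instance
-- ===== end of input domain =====

-- B replaces A's triple nested index loop by a precomputed count-below table plus the
-- symmetry formula (t3 + 3*t2 + 2*t1) // 6 over ordered tuples; same return value, fewer iterations.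

-- ===== PORT A =====
def pvScoresA : List Int := PySem.List.pyRange 1 21 1 ++ [25]
def pvPossA : List Int :=
  [0] ++ pvScoresA ++ pvScoresA.map (fun s => 2 * s)
      ++ (PySem.List.slice pvScoresA none (some (20 : Int))).map (fun s => 3 * s)

def ways_to_checkout (max_score : Int) : Int :=
  let possibilities := pvPossA
  let n : Int := (possibilities.length : Int)
  (PySem.List.pyRange 0 n 1).foldl (fun count i =>
    (PySem.List.pyRange i n 1).foldl (fun count j =>
      (PySem.List.pyRange j n 1).foldl (fun count k =>
        if PySem.List.pyGetD possibilities i 0 + PySem.List.pyGetD possibilities j 0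
             + PySem.List.pyGetD possibilities k 0 < max_score
        then count + 1 else count) count) count) 0

-- ===== PORT B =====
def pvScoresB : List Int := PySem.List.pyRange 1 21 1 ++ [25]
def pvValsB : List Int :=
  [0] ++ pvScoresB ++ pvScoresB.map (fun s => 2 * s)
      ++ (PySem.List.slice pvScoresB none (some (20 : Int))).map (fun s => 3 * s)

-- cnt_table = [sum(1 for x in vals if x < v) for v in range(62)]
def pvCntTableB : List Int :=
  (PySem.List.pyRange 0 62 1).map (fun v =>
    pvValsB.foldl (fun c x => if x < v then c + 1 else c) 0)

def pvCntLtB (v : Int) : Int :=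
  if v ≤ 0 then 0
  else if 62 ≤ v then (pvValsB.length : Int)
  else PySem.List.pyGetD pvCntTableB v 0

def ways_to_checkout_alt (max_score : Int) : Int :=
  let t3 := pvValsB.foldl (fun t3 a =>
              pvValsB.foldl (fun t3 b => t3 + pvCntLtB (max_score - a - b)) t3) 0
  let t2 := pvValsB.foldl (fun t2 a => t2 + pvCntLtB (max_score - 2 * a)) 0
  let t1 := pvValsB.foldl (fun t1 a => if 3 * a < max_score then t1 + 1 else t1) 0
  PySem.Int.floordiv (t3 + 3 * t2 + 2 * t1) 6

-- ===== PRECONDITION & SPEC =====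
def Spec_ways_to_checkout (max_score : Int) (out : Int) : Prop := out = ways_to_checkout_alt max_score
instance (max_score : Int) (out : Int) : Decidable (Spec_ways_to_checkout max_score out) := by unfold Spec_ways_to_checkout; infer_instance

-- ===== CLAIM (what is proved, stated in full; the proofs are below) =====
def Claim_equal_ways_to_checkout : Prop := ∀ (max_score : Int), Dom_ways_to_checkout max_score → Spec_ways_to_checkout max_score (ways_to_checkout max_score)

-- ===== LEMMAS AND PROOFS =====

-- number of elements of l strictly below v
def cntF : List Int → Int → Int
  | [], _ => 0
  | x :: t, v => (if x < v then 1 else 0) + cntF t v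

-- number of pairs i ≤ j (by position) in l with l[i] + l[j] < N
def pairF : List Int → Int → Int
  | [], _ => 0
  | x :: t, N => cntF (x :: t) (N - x) + pairF t N

-- number of triples i ≤ j ≤ k (by position) in l with sum < M
def tripF : List Int → Int → Int
  | [], _ => 0
  | x :: t, M => pairF (x :: t) (M - x) + tripF t M

def d2F : List Int → Int → Int
  | [], _ => 0
  | a :: t, v => (if 2 * a < v then 1 else 0) + d2F t v

def s1F : List Int → Int → Int
  | [], _ => 0
  | a :: t, M => (if 3 * a < M then 1 else 0) + s1F t M

def rowF (full : List Int) : List Int → Int → Int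
  | [], _ => 0
  | b :: t, v => cntF full (v - b) + rowF full t v

def s2F (full : List Int) : List Int → Int → Int
  | [], _ => 0
  | a :: t, M => cntF full (M - 2 * a) + s2F full t M

def s3F (full : List Int) : List Int → Int → Int
  | [], _ => 0
  | a :: t, M => rowF full full (M - a) + s3F full t M

lemma rowF_cons_full (x : Int) (t l : List Int) (v : Int) :
    rowF (x :: t) l v = cntF l (v - x) + rowF t l v := by
  induction l with
  | nil => simp [rowF, cntF]
  | cons b l ih =>
      simp only [rowF, cntF, ih]
      have h : (x < v - b) = (b < v - x) := by
        apply propext; constructor <;> intro <;> omega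
      simp only [h]; ring

lemma s2F_cons_full (x : Int) (t l : List Int) (M : Int) :
    s2F (x :: t) l M = d2F l (M - x) + s2F t l M := by
  induction l with
  | nil => simp [s2F, d2F]
  | cons a l ih =>
      simp only [s2F, d2F, cntF, ih]
      have h : (x < M - 2 * a) = (2 * a < M - x) := by
        apply propext; constructor <;> intro <;> omega
      simp only [h]; ring

lemma s3F_cons_full (x : Int) (t l : List Int) (M : Int) :
    s3F (x :: t) l M = cntF l (M - 2 * x) + 2 * rowF t l (M - x) + s3F t l M := by
  induction l with
  | nil => simp [s3F, cntF, rowF]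
  | cons a l ih =>
      simp only [s3F, rowF_cons_full, rowF, cntF, ih]
      have h1 : (x < M - a - x) = (a < M - 2 * x) := by
        apply propext; constructor <;> intro <;> omega
      simp only [h1]
      rw [show M - a - x = M - x - a from by ring]
      ring

lemma pair_double (l : List Int) (N : Int) :
    2 * pairF l N = rowF l l N + d2F l N := by
  induction l with
  | nil => simp [pairF, rowF, d2F]
  | cons x t ih =>
      simp only [pairF, rowF_cons_full, rowF, d2F, cntF]
      have h : (2 * x < N) = (x < N - x) := by
        apply propext; constructor <;> intro <;> omega
      simp only [h]; linarith [ih]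

lemma trip_six (l : List Int) (M : Int) :
    6 * tripF l M = s3F l l M + 3 * s2F l l M + 2 * s1F l M := by
  induction l with
  | nil => simp [tripF, s3F, s2F, s1F]
  | cons x t ih =>
      have ep : 2 * pairF (x :: t) (M - x)
          = cntF (x :: t) (M - 2 * x) + cntF t (M - 2 * x) + rowF t t (M - x)
            + d2F (x :: t) (M - x) := by
        rw [pair_double, rowF_cons_full]
        simp only [rowF]
        rw [show M - x - x = M - 2 * x from by ring]
        ring
      have ed : d2F (x :: t) (M - x) = (if 3 * x < M then (1:Int) else 0) + d2F t (M - x) := by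
        have h : (2 * x < M - x) = (3 * x < M) := by
          apply propext; constructor <;> intro <;> omega
        simp only [d2F]; simp only [h]
      have ec : cntF (x :: t) (M - 2 * x)
          = (if 3 * x < M then (1:Int) else 0) + cntF t (M - 2 * x) := by
        have h : (x < M - 2 * x) = (3 * x < M) := by
          apply propext; constructor <;> intro <;> omega
        simp only [cntF]; simp only [h]
      simp only [tripF]
      rw [s3F_cons_full, s2F_cons_full]
      simp only [rowF, s3F, s2F, s1F]
      rw [show M - x - x = M - 2 * x from by ring]
      linarith [ih, ep, ed, ec]

-- ----- A-side: the index loops compute tripF -----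

def suffSum (g : List Int → Int) : List Int → Int
  | [] => 0
  | x :: t => g (x :: t) + suffSum g t

lemma foldl_suffix_aux (g : List Int → Int) (xs : List Int) :
    ∀ (fuel m : Nat) (c : Int), xs.length ≤ m + fuel →
    (PySem.List.pyRange (m : Int) (xs.length : Int) 1).foldl
        (fun c j => c + g (xs.drop j.toNat)) c
      = c + suffSum g (xs.drop m) := by
  intro fuel
  induction fuel with
  | zero =>
      intro m c h
      rw [PySem.List.pyRange_one_eq_nil (by exact_mod_cast (by omega : xs.length ≤ m))]
      rw [List.drop_eq_nil_of_le (by omega)]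
      simp [suffSum]
  | succ k ih =>
      intro m c h
      by_cases hm : xs.length ≤ m
      · rw [PySem.List.pyRange_one_eq_nil (by exact_mod_cast hm)]
        rw [List.drop_eq_nil_of_le hm]
        simp [suffSum]
      · have hm' : m < xs.length := by omega
        rw [PySem.List.pyRange_one_cons (by exact_mod_cast hm')]
        rw [List.foldl_cons]
        have hcast : ((m : Int) + 1) = ((m + 1 : Nat) : Int) := by push_cast; ring
        rw [hcast, Int.toNat_natCast]
        rw [ih (m + 1) (c + g (xs.drop m)) (by omega)]
        have hd : xs.drop m = xs[m] :: xs.drop (m + 1) := List.drop_eq_getElem_cons hm'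
        rw [hd]
        simp only [suffSum]
        rw [← hd]
        ring

lemma foldl_suffix (g : List Int → Int) (xs : List Int) (i : Int) (hi : 0 ≤ i) (c : Int) :
    (PySem.List.pyRange i (xs.length : Int) 1).foldl
        (fun c j => c + g (xs.drop j.toNat)) c
      = c + suffSum g (xs.drop i.toNat) := by
  obtain ⟨m, rfl⟩ := Int.eq_ofNat_of_zero_le hi
  rw [Int.toNat_natCast]
  exact foldl_suffix_aux g xs xs.length m c (by omega)

lemma foldl_cntF (M u : Int) (l : List Int) : ∀ c : Int,
    l.foldl (fun c x => if u + x < M then c + 1 else c) c = c + cntF l (M - u) := by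
  induction l with
  | nil => intro c; simp [cntF]
  | cons x t ih =>
      intro c
      simp only [List.foldl_cons, cntF, ih]
      split_ifs <;> linarith

lemma foldl_cnt0 (v : Int) (l : List Int) : ∀ c : Int,
    l.foldl (fun c x => if x < v then c + 1 else c) c = c + cntF l v := by
  induction l with
  | nil => intro c; simp [cntF]
  | cons x t ih =>
      intro c
      simp only [List.foldl_cons, cntF, ih]
      split_ifs <;> linarith

lemma pyGetD_headD_drop (xs : List Int) (j : Int) (h0 : 0 ≤ j) (h1 : j < (xs.length : Int)) :
    PySem.List.pyGetD xs j 0 = (xs.drop j.toNat).headD 0 := by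
  rw [PySem.List.pyGetD_eq_getElem xs 0 h0 h1]
  have hlt : j.toNat < xs.length := by omega
  rw [List.headD_eq_head?_getD, List.head?_drop, List.getElem?_eq_getElem hlt]
  rfl

lemma suffSum_pairF (N : Int) (l : List Int) :
    suffSum (fun s => cntF s (N - s.headD 0)) l = pairF l N := by
  induction l with
  | nil => rfl
  | cons x t ih => simp only [suffSum, pairF, List.headD_cons, ih]

lemma suffSum_tripF (M : Int) (l : List Int) :
    suffSum (fun s => pairF s (M - s.headD 0)) l = tripF l M := by
  induction l with
  | nil => rfl
  | cons x t ih => simp only [suffSum, tripF, List.headD_cons, ih]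

lemma A_eq_tripF (M : Int) : ways_to_checkout M = tripF pvPossA M := by
  simp only [ways_to_checkout]
  have hmid : ∀ c : Int, ∀ i : Int, i ∈ PySem.List.pyRange 0 (pvPossA.length : Int) 1 →
      (PySem.List.pyRange i (pvPossA.length : Int) 1).foldl (fun count j =>
        (PySem.List.pyRange j (pvPossA.length : Int) 1).foldl (fun count k =>
          if PySem.List.pyGetD pvPossA i 0 + PySem.List.pyGetD pvPossA j 0
               + PySem.List.pyGetD pvPossA k 0 < M
          then count + 1 else count) count) c
      = c + (fun s => pairF s (M - s.headD 0)) (pvPossA.drop i.toNat) := by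
    intro c i hi
    have hib := (PySem.List.mem_pyRange_one).mp hi
    have hinner : ∀ c' : Int, ∀ j : Int, j ∈ PySem.List.pyRange i (pvPossA.length : Int) 1 →
        (PySem.List.pyRange j (pvPossA.length : Int) 1).foldl (fun count k =>
          if PySem.List.pyGetD pvPossA i 0 + PySem.List.pyGetD pvPossA j 0
               + PySem.List.pyGetD pvPossA k 0 < M
          then count + 1 else count) c'
        = c' + (fun s => cntF s ((M - PySem.List.pyGetD pvPossA i 0) - s.headD 0))
                 (pvPossA.drop j.toNat) := by
      intro c' j hj
      have hjb := (PySem.List.mem_pyRange_one).mp hj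
      have step1 :
          (PySem.List.pyRange j (pvPossA.length : Int) 1).foldl (fun count k =>
            if PySem.List.pyGetD pvPossA i 0 + PySem.List.pyGetD pvPossA j 0
                 + PySem.List.pyGetD pvPossA k 0 < M
            then count + 1 else count) c'
          = (pvPossA.drop j.toNat).foldl (fun count x =>
              if PySem.List.pyGetD pvPossA i 0 + PySem.List.pyGetD pvPossA j 0
                   + x < M
              then count + 1 else count) c' :=
        PySem.List.foldl_pyRange_pyGetD' pvPossA 0
          (fun count x =>
            if PySem.List.pyGetD pvPossA i 0 + PySem.List.pyGetD pvPossA j 0 + x < M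
            then count + 1 else count) c' (by omega)
      rw [step1]
      rw [foldl_cntF M (PySem.List.pyGetD pvPossA i 0 + PySem.List.pyGetD pvPossA j 0)]
      have harg : M - (PySem.List.pyGetD pvPossA i 0 + PySem.List.pyGetD pvPossA j 0)
          = (M - PySem.List.pyGetD pvPossA i 0) - PySem.List.pyGetD pvPossA j 0 := by ring
      rw [harg, pyGetD_headD_drop pvPossA j (by omega) (by omega)]
    rw [PySem.List.foldl_congr_mem _ _
          (fun c' j => c' + (fun s => cntF s ((M - PySem.List.pyGetD pvPossA i 0) - s.headD 0))
                 (pvPossA.drop j.toNat)) _ hinner]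
    rw [foldl_suffix (fun s => cntF s (M - PySem.List.pyGetD pvPossA i 0 - s.headD 0))
          pvPossA i (by omega)]
    rw [suffSum_pairF]
    rw [pyGetD_headD_drop pvPossA i (by omega) (by omega)]
  rw [PySem.List.foldl_congr_mem _ _
        (fun c i => c + (fun s => pairF s (M - s.headD 0)) (pvPossA.drop i.toNat)) _ hmid]
  rw [foldl_suffix (fun s => pairF s (M - s.headD 0)) pvPossA 0 (by omega)]
  rw [show ((0:Int).toNat) = 0 from rfl, List.drop_zero, suffSum_tripF]
  ring

-- ----- B-side: the table lookups compute cntF, and the folds compute s3F, s2F, s1F -----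

lemma cntF_of_nonpos (l : List Int) (v : Int) (hl : ∀ x ∈ l, 0 ≤ x) (hv : v ≤ 0) :
    cntF l v = 0 := by
  induction l with
  | nil => rfl
  | cons x t ih =>
      have hx := hl x (by simp)
      simp only [cntF, if_neg (by omega : ¬ x < v)]
      rw [ih (fun y hy => hl y (by simp [hy]))]
      ring

lemma cntF_of_big (l : List Int) (v : Int) (hl : ∀ x ∈ l, x < 62) (hv : 62 ≤ v) :
    cntF l v = (l.length : Int) := by
  induction l with
  | nil => rfl
  | cons x t ih =>
      have hx := hl x (by simp)
      simp only [cntF, if_pos (by omega : x < v)]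
      rw [ih (fun y hy => hl y (by simp [hy]))]
      simp only [List.length_cons]
      push_cast
      ring

lemma cntLt_eq (v : Int) : pvCntLtB v = cntF pvValsB v := by
  unfold pvCntLtB
  split_ifs with h1 h2
  · rw [cntF_of_nonpos pvValsB v (by decide) h1]
  · rw [cntF_of_big pvValsB v (by decide) h2]
  · unfold pvCntTableB
    rw [PySem.List.pyGetD_map_pyRange_of_nonneg _ 62 v 0 (by omega) (by omega)]
    rw [foldl_cnt0]
    ring

lemma foldl_rowF (full : List Int) (v : Int) (l : List Int) : ∀ c : Int,
    l.foldl (fun c b => c + cntF full (v - b)) c = c + rowF full l v := by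
  induction l with
  | nil => intro c; simp [rowF]
  | cons b t ih => intro c; simp only [List.foldl_cons, rowF, ih]; ring

lemma foldl_s2F (full : List Int) (M : Int) (l : List Int) : ∀ c : Int,
    l.foldl (fun c a => c + cntF full (M - 2 * a)) c = c + s2F full l M := by
  induction l with
  | nil => intro c; simp [s2F]
  | cons a t ih => intro c; simp only [List.foldl_cons, s2F, ih]; ring

lemma foldl_s3F (full : List Int) (M : Int) (l : List Int) : ∀ c : Int,
    l.foldl (fun c a => c + rowF full full (M - a)) c = c + s3F full l M := by
  induction l with
  | nil => intro c; simp [s3F]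
  | cons a t ih => intro c; simp only [List.foldl_cons, s3F, ih]; ring

lemma foldl_s1F (M : Int) (l : List Int) : ∀ c : Int,
    l.foldl (fun c a => if 3 * a < M then c + 1 else c) c = c + s1F l M := by
  induction l with
  | nil => intro c; simp [s1F]
  | cons a t ih =>
      intro c
      simp only [List.foldl_cons, s1F, ih]
      split_ifs <;> linarith

lemma B_eq (M : Int) : ways_to_checkout_alt M = tripF pvValsB M := by
  simp only [ways_to_checkout_alt, cntLt_eq]
  have ht3 : pvValsB.foldl (fun t3 a =>
      pvValsB.foldl (fun t3 b => t3 + cntF pvValsB (M - a - b)) t3) 0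
      = s3F pvValsB pvValsB M := by
    have hin : ∀ c : Int, ∀ a : Int, a ∈ pvValsB →
        pvValsB.foldl (fun t3 b => t3 + cntF pvValsB (M - a - b)) c
          = c + rowF pvValsB pvValsB (M - a) := by
      intro c a _
      exact foldl_rowF pvValsB (M - a) pvValsB c
    rw [PySem.List.foldl_congr_mem _ _
          (fun c a => c + rowF pvValsB pvValsB (M - a)) _ hin]
    rw [foldl_s3F]
    ring
  rw [ht3, foldl_s2F, foldl_s1F]
  rw [show (0:Int) + s2F pvValsB pvValsB M = s2F pvValsB pvValsB M from by ring]
  rw [show (0:Int) + s1F pvValsB M = s1F pvValsB M from by ring]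
  rw [show s3F pvValsB pvValsB M + 3 * s2F pvValsB pvValsB M + 2 * s1F pvValsB M
      = 6 * tripF pvValsB M from (trip_six pvValsB M).symm]
  rw [PySem.Int.floordiv_eq_ediv_of_pos (by norm_num)]
  exact Int.mul_ediv_cancel_left _ (by norm_num)

lemma poss_eq : pvPossA = pvValsB := rfl

-- ===== VERDICT (by name: the statement is the Claim_ definition above) =====
theorem ways_to_checkout_spec : Claim_equal_ways_to_checkout := by
  intro M _
  unfold Spec_ways_to_checkout
  rw [A_eq_tripF, B_eq, poss_eq]
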